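-- pv_equiv track=rewrite | github.com/mf1832146/api-completion | utils.py | deal_with_sub_str
-- ===== SOURCE A (Python) =====
-- import collections
--
-- def deal_with_sub_str(sub_seq, is_pre, max_api_len=10):
--     class_seq = []
--     api_seq = []
--     ordered_dict = collections.OrderedDict()
--     for i in range(len(sub_seq) - 1, 0, -2):
--         class_name = sub_seq[i - 1]
--         api_name = class_name + '.' + sub_seq[i]
--         if class_name not in ordered_dict:
--             ordered_dict[class_name] = []
--         ordered_dict[class_name].insert(0, api_name)
--
--         if len(ordered_dict[class_name]) > max_api_len:
--             seq = ordered_dict[class_name]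
--             if is_pre:
--                 ordered_dict[class_name] = seq[-max_api_len:]
--             else:
--                 ordered_dict[class_name] = seq[:max_api_len]
--     for key, item in ordered_dict.items():
--         class_seq.insert(0, key)
--         api_seq.insert(0, item)
--     return class_seq, api_seq
-- ===== SOURCE B (Python) =====
-- def deal_with_sub_str(sub_seq, is_pre, max_api_len=10):
--     full = {}
--     order = {}
--     for p in range(len(sub_seq) % 2, len(sub_seq) - 1, 2):
--         c = sub_seq[p]
--         if c in full:
--             del order[c]
--         else:
--             full[c] = []
--         order[c] = True
--         full[c].append(c + '.' + sub_seq[p + 1])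
--     class_seq = list(order)
--     api_seq = [full[c][-max_api_len:] if is_pre else full[c][:max_api_len]
--                for c in class_seq]
--     return class_seq, api_seq
-- ===== Notes on version B (the rewrite author's own statement) =====
-- stated objective: faster
-- what changed: B replaces A's backward scan with per-step list re-slicing and final OrderedDict reversal by a single forward scan that appends each API into full per-class lists while keeping the class order in a move-to-end dict, then trims each class list exactly once at the end.
-- outside the precondition, e.g. on deal_with_sub_str(['C', 'a', 'C', 'b'], True, -1): A returns (['C'], [[]]), B returns (['C'], [['C.b']]); on deal_with_sub_str(['C', 'a', 'C', 'b'], False, -1): A returns (['C'], [[]]), B returns (['C'], [['C.a']])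
import Mathlib
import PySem

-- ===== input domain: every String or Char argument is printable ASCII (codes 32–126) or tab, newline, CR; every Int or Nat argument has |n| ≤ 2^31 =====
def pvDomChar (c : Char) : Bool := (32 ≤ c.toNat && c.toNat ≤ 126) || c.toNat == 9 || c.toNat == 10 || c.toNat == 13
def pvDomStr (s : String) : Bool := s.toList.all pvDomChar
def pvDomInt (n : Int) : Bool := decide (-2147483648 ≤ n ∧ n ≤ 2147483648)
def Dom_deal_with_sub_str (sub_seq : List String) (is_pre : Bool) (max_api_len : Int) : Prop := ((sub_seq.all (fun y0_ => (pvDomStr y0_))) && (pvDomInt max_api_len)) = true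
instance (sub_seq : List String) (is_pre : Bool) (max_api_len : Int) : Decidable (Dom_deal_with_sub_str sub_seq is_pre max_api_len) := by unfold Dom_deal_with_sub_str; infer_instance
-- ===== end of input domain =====

-- B groups the API calls in one forward scan (full per-class lists + a move-to-end order dict)
-- and trims each class list once at the end, instead of A's backward scan with per-step list
-- re-slicing and OrderedDict reversal (measured faster); equal results proved for max_api_len >= 0.


-- ===== PORT A =====
def deal_with_sub_str (sub_seq : List String) (is_pre : Bool) (max_api_len : Int) : List String × List (List String) :=
  let ordered_dict : PySem.Dict String (List String) :=
    (PySem.List.pyRange (PySem.List.len sub_seq - 1) 0 (-2)).foldl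
      (fun d i =>
        let class_name := PySem.List.pyGetD sub_seq (i - 1) ""
        let api_name := class_name ++ "." ++ PySem.List.pyGetD sub_seq i ""
        let d := if !(d.contains class_name) then d.insert class_name [] else d
        let d := d.insert class_name (PySem.List.insert (d.getD class_name []) 0 api_name)
        if PySem.List.len (d.getD class_name []) > max_api_len then
          let seq := d.getD class_name []
          if is_pre then d.insert class_name (PySem.List.slice seq (some (-max_api_len)) none)
          else d.insert class_name (PySem.List.slice seq none (some max_api_len))
        else d)
      PySem.Dict.empty
  ordered_dict.items.foldl
    (fun acc kv => (PySem.List.insert acc.1 0 kv.1, PySem.List.insert acc.2 0 kv.2))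
    ([], [])

-- ===== PORT B =====
def deal_with_sub_str_alt (sub_seq : List String) (is_pre : Bool) (max_api_len : Int) : List String × List (List String) :=
  let st : PySem.Dict String (List String) × PySem.Dict String Bool :=
    (PySem.List.pyRange (PySem.Int.mod (PySem.List.len sub_seq) 2) (PySem.List.len sub_seq - 1) 2).foldl
      (fun st p =>
        let c := PySem.List.pyGetD sub_seq p ""
        let fo := if st.1.contains c then (st.1, st.2.erase c)
                  else (st.1.insert c [], st.2)
        (fo.1.modify c [] (· ++ [c ++ "." ++ PySem.List.pyGetD sub_seq (p + 1) ""]),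
         fo.2.insert c true))
      (PySem.Dict.empty, PySem.Dict.empty)
  let class_seq := st.2.keys
  (class_seq, class_seq.map (fun c =>
    if is_pre then PySem.List.slice (st.1.getD c []) (some (-max_api_len)) none
    else PySem.List.slice (st.1.getD c []) none (some max_api_len)))

-- ===== PRECONDITION & SPEC =====
-- Pre_ restricts max_api_len to its natural domain, nonnegative lengths: for a negative
-- max_api_len A's repeated slice arithmetic accidentally empties every per-class list,
-- while B keeps the slice of the full list.
def Pre_deal_with_sub_str (sub_seq : List String) (is_pre : Bool) (max_api_len : Int) : Prop :=
  0 ≤ max_api_len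
instance (sub_seq : List String) (is_pre : Bool) (max_api_len : Int) : Decidable (Pre_deal_with_sub_str sub_seq is_pre max_api_len) := by unfold Pre_deal_with_sub_str; infer_instance

def pvWitness_deal_with_sub_str : List String × Bool × Int := (["A", "x", "B", "y", "A", "z"], true, 2)

def Spec_deal_with_sub_str (sub_seq : List String) (is_pre : Bool) (max_api_len : Int) (out : List String × List (List String)) : Prop := out = deal_with_sub_str_alt sub_seq is_pre max_api_len
instance (sub_seq : List String) (is_pre : Bool) (max_api_len : Int) (out : List String × List (List String)) : Decidable (Spec_deal_with_sub_str sub_seq is_pre max_api_len out) := by unfold Spec_deal_with_sub_str; infer_instance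

-- ===== CLAIM (what is proved, stated in full; the proofs are below) =====
def Claim_equal_deal_with_sub_str : Prop := ∀ (sub_seq : List String) (is_pre : Bool) (max_api_len : Int), Dom_deal_with_sub_str sub_seq is_pre max_api_len → Pre_deal_with_sub_str sub_seq is_pre max_api_len → Spec_deal_with_sub_str sub_seq is_pre max_api_len (deal_with_sub_str sub_seq is_pre max_api_len)

-- ===== LEMMAS AND PROOFS =====

-- the trim both programs apply (B once per class, A incrementally)
def trimF (is_pre : Bool) (m : Int) (l : List String) : List String :=
  if is_pre then PySem.List.slice l (some (-m)) none else PySem.List.slice l none (some m)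

-- A's conditional trim
def condTrim (is_pre : Bool) (m : Int) (l : List String) : List String :=
  if PySem.List.len l > m then trimF is_pre m l else l

-- A's loop body on a (class, api) pair
def stepA (is_pre : Bool) (m : Int) (d : PySem.Dict String (List String)) (x : String × String) :
    PySem.Dict String (List String) :=
  let d := if !(d.contains x.1) then d.insert x.1 [] else d
  let d := d.insert x.1 (PySem.List.insert (d.getD x.1 []) 0 x.2)
  if PySem.List.len (d.getD x.1 []) > m then
    let seq := d.getD x.1 []
    if is_pre then d.insert x.1 (PySem.List.slice seq (some (-m)) none)
    else d.insert x.1 (PySem.List.slice seq none (some m))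
  else d

-- B's loop body on a (class, api) pair
def stepB (st : PySem.Dict String (List String) × PySem.Dict String Bool) (x : String × String) :
    PySem.Dict String (List String) × PySem.Dict String Bool :=
  let fo := if st.1.contains x.1 then (st.1, st.2.erase x.1)
            else (st.1.insert x.1 [], st.2)
  (fo.1.modify x.1 [] (· ++ [x.2]), fo.2.insert x.1 true)

-- move-to-end order
def ordStep (o : List String) (c : String) : List String := o.erase c ++ [c]
def ordOf (M : List String) : List String := M.foldl ordStep []

-- B's order dict, seen as its key list
def ordDict (o : List String) : PySem.Dict String Bool := ⟨o.map (fun c => (c, true))⟩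

lemma filter_map_pair (l : List String) (c : String) :
    (l.map (fun k => (k, true))).filter (fun p => !(p.1 == c)) =
      (l.filter (fun k => !(k == c))).map (fun k => (k, true)) := by
  induction l with
  | nil => rfl
  | cons x l ih => by_cases h : x = c <;> simp [h, ih]

lemma contains_ordDict (o : List String) (c : String) :
    (ordDict o).contains c = decide (c ∈ o) := by
  rw [ordDict, PySem.Dict.contains_mk]
  induction o with
  | nil => rfl
  | cons x o ih =>
    simp only [List.map_cons, List.any_cons, ih]
    by_cases h : x = c
    · subst h; simp
    · simp [h, Ne.symm h]

lemma ordDict_step (o : List String) (ho : o.Nodup) (c : String) :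
    ((if c ∈ o then (ordDict o).erase c else ordDict o).insert c true) =
      ordDict (ordStep o c) := by
  by_cases h : c ∈ o
  · have herase : (ordDict o).erase c = ordDict (o.erase c) := by
      simp only [ordDict, PySem.Dict.erase, filter_map_pair]
      rw [ho.erase_eq_filter]
      rfl
    rw [if_pos h, herase, PySem.Dict.insert,
      if_neg (by rw [contains_ordDict]; simp [ho.not_mem_erase])]
    simp [ordDict, ordStep]
  · rw [if_neg h, PySem.Dict.insert, if_neg (by rw [contains_ordDict]; simp [h])]
    simp [ordDict, ordStep, List.erase_of_not_mem h]

-- forward list of (class, api) pairs read from sub_seq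
def pairsOf (sub_seq : List String) : List (String × String) :=
  (PySem.List.pyRange ((sub_seq.length % 2 : Nat) : Int) ((sub_seq.length : Int) - 1) 2).map
    (fun p => (PySem.List.pyGetD sub_seq p "",
               PySem.List.pyGetD sub_seq p "" ++ "." ++ PySem.List.pyGetD sub_seq (p + 1) ""))

def apisOf (L : List (String × String)) (c : String) : List String :=
  (L.filter (fun p => p.1 == c)).map (·.2)

lemma range_rev (n : Nat) :
    PySem.List.pyRange ((n : Int) - 1) 0 (-2) =
      ((PySem.List.pyRange ((n % 2 : Nat) : Int) ((n : Int) - 1) 2).map (· + 1)).reverse := by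
  simp only [PySem.List.pyRange]
  norm_num
  split_ifs with h1 h2 h2
  · apply List.ext_getElem
    · simp; omega
    · intro k hk1 hk2
      simp only [List.length_map, List.length_range, List.length_reverse] at hk1 hk2
      simp only [List.getElem_reverse, List.getElem_map, List.getElem_range,
        Function.comp_apply, List.length_map, List.length_range, List.length_reverse]
      push_cast
      omega
  · exfalso; omega
  · exfalso; omega
  · simp

lemma stepA_eq (ip : Bool) (m : Int) (d : PySem.Dict String (List String)) (x : String × String) :
    stepA ip m d x = d.insert x.1 (condTrim ip m (x.2 :: d.getD x.1 [])) := by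
  by_cases hc : d.contains x.1 = true
  · simp only [stepA, condTrim, trimF, hc, Bool.not_true, if_false,
      Bool.false_eq_true, PySem.List.insert_zero, PySem.Dict.getD_insert_self,
      PySem.Dict.insert_insert_self]
    split_ifs <;> simp [PySem.Dict.insert_insert_self]
  · simp only [stepA, condTrim, trimF, hc, Bool.not_false, if_true,
      PySem.List.insert_zero, PySem.Dict.getD_insert_self, PySem.Dict.insert_insert_self,
      PySem.Dict.getD_of_not_contains _ _ (by simpa using hc)]
    split_ifs <;> simp [PySem.Dict.insert_insert_self]

lemma trimF_eq (ip : Bool) (m : Nat) (l : List String) :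
    trimF ip (m : Int) l = if ip then (if m = 0 then l else l.drop (l.length - m)) else l.take m := by
  cases ip with
  | false => simp [trimF, PySem.List.slice_to_natCast]
  | true =>
    rcases Nat.eq_zero_or_pos m with h | h
    · subst h; simp [trimF]
    · simp [trimF, PySem.List.slice_from_neg_natCast l m h, Nat.pos_iff_ne_zero.mp h]

lemma condTrim_trim (ip : Bool) (m : Nat) (a : String) (l : List String) :
    condTrim ip (m : Int) (a :: trimF ip (m : Int) l) = trimF ip (m : Int) (a :: l) := by
  rw [trimF_eq, trimF_eq]
  cases ip with
  | false =>
    simp only [condTrim, Bool.false_eq_true, if_false]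
    rw [trimF_eq]
    simp only [PySem.List.len_eq, Bool.false_eq_true, if_false]
    by_cases hm : m = 0
    · subst hm; simp
    · obtain ⟨k, rfl⟩ : ∃ k, m = k + 1 := ⟨m - 1, by omega⟩
      by_cases hl : l.length < k + 1
      · rw [List.take_of_length_le (by omega), if_neg (by simp; omega),
            List.take_of_length_le (by simp; omega)]
      · rw [if_pos (by simp; omega), List.take_succ_cons, List.take_succ_cons,
            List.take_take]
        congr 2
        omega
  | true =>
    simp only [condTrim, PySem.List.len_eq, if_true]
    rw [trimF_eq]
    simp only [if_true]
    by_cases hm : m = 0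
    · subst hm; simp
    · simp only [if_neg hm]
      by_cases hl : l.length < m
      · rw [show l.length - m = 0 by omega, List.drop_zero, if_neg (by simp; omega),
            show (a :: l).length - m = 0 by simp; omega, List.drop_zero]
      · rw [if_pos (by simp; omega)]
        simp only [List.length_cons, List.length_drop]
        rw [show l.length - (l.length - m) + 1 - m = 1 by omega,
            show l.length + 1 - m = (l.length - m) + 1 by omega]
        simp [List.drop_succ_cons]

lemma trimF_nil (ip : Bool) (m : Int) : trimF ip m [] = [] := by
  unfold trimF
  split_ifs <;>
    exact List.eq_nil_iff_forall_not_mem.mpr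
      (fun x hx => by simpa using PySem.List.mem_of_mem_slice _ _ _ hx)

lemma ordOf_general (M : List String) : ∀ (o : List String), o.Nodup →
    M.foldl ordStep o = o.filter (fun c => !(decide (c ∈ M))) ++ ordOf M := by
  induction M with
  | nil => simp [ordOf]
  | cons c M ih =>
    intro o ho
    have hstep : (ordStep o c).Nodup := by
      simp only [ordStep]
      exact List.Nodup.append (ho.erase c) (List.nodup_singleton c)
        (by simp [List.disjoint_singleton]; exact ho.not_mem_erase)
    have h1 : (c :: M).foldl ordStep o = M.foldl ordStep (ordStep o c) := rfl
    have h2 : ordOf (c :: M) = M.foldl ordStep (ordStep [] c) := rfl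
    rw [h1, ih _ hstep, h2, ih _ (by simp [ordStep])]
    simp only [ordStep, List.erase_nil, List.nil_append, List.filter_append]
    rw [← List.append_assoc]
    congr 1
    congr 1
    rw [ho.erase_eq_filter, List.filter_filter]
    apply List.filter_congr
    intro x hx
    by_cases h : x = c <;> by_cases h2 : x ∈ M <;> simp [h, h2]

lemma ordOf_cons (c : String) (M : List String) :
    ordOf (c :: M) = (if c ∈ M then [] else [c]) ++ ordOf M := by
  have : ordOf (c :: M) = M.foldl ordStep (ordStep [] c) := rfl
  rw [this, ordOf_general _ _ (by simp [ordStep])]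
  simp only [ordStep, List.erase_nil, List.nil_append]
  by_cases h : c ∈ M <;> simp [h]

lemma mem_ordOf (M : List String) (x : String) : x ∈ ordOf M ↔ x ∈ M := by
  induction M with
  | nil => simp [ordOf]
  | cons c M ih =>
    rw [ordOf_cons]
    by_cases h : c ∈ M <;> simp [h, ih]
    exact fun hx => hx ▸ h

lemma nodup_ordOf (M : List String) : (ordOf M).Nodup := by
  induction M with
  | nil => simp [ordOf]
  | cons c M ih =>
    rw [ordOf_cons]
    by_cases h : c ∈ M <;> simp [h, ih]
    simp [mem_ordOf, h]

lemma foldA_char (ip : Bool) (m : Nat) (L : List (String × String)) :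
    (L.reverse.foldl (stepA ip (m : Int)) PySem.Dict.empty).items =
      ((ordOf (L.map (·.1))).reverse).map (fun c => (c, trimF ip (m : Int) (apisOf L c))) := by
  induction L with
  | nil => rfl
  | cons x L ih =>
    obtain ⟨c, a⟩ := x
    set d := L.reverse.foldl (stepA ip (m : Int)) PySem.Dict.empty with hd
    have hfold : ((c, a) :: L).reverse.foldl (stepA ip (m : Int)) PySem.Dict.empty
        = stepA ip (m : Int) d (c, a) := by
      rw [List.reverse_cons, List.foldl_append, List.foldl_cons, List.foldl_nil]
    have hkeys : d.keys = (ordOf (L.map (·.1))).reverse := by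
      show d.items.map (·.1) = _
      rw [ih]
      simp [List.map_map, Function.comp_def]
    have hnodk : d.keys.Nodup := by
      rw [hkeys]; exact List.nodup_reverse.mpr (nodup_ordOf _)
    rw [hfold, stepA_eq]
    by_cases hc : c ∈ L.map (·.1)
    · -- class already present: in-place value update, order unchanged
      have hmem : (c, trimF ip (m : Int) (apisOf L c)) ∈ d.items := by
        rw [ih]
        exact List.mem_map_of_mem (by rw [List.mem_reverse, mem_ordOf]; exact hc)
      have hgetD : d.getD c [] = trimF ip (m : Int) (apisOf L c) :=
        PySem.Dict.getD_of_mem_items d hmem hnodk []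
      have hcon : d.contains c = true := by
        rw [PySem.Dict.contains_iff_mem_keys, hkeys, List.mem_reverse, mem_ordOf]; exact hc
      rw [PySem.Dict.items_insert_of_contains d _ hcon, ih, List.map_map]
      have hordc : ordOf (((c, a) :: L).map (·.1)) = ordOf (L.map (·.1)) := by
        simp only [List.map_cons, ordOf_cons, hc, if_true, List.nil_append]
      rw [hordc]
      apply List.map_congr_left
      intro y hy
      simp only [Function.comp_apply]
      by_cases hyc : y = c
      · subst hyc
        simp only [beq_self_eq_true, if_true, hgetD, condTrim_trim]
        congr 1
        congr 1
        simp [apisOf, List.filter_cons]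
      · simp only [beq_iff_eq, hyc, if_false]
        congr 2
        simp only [apisOf, List.filter_cons]
        have : ((c, a).1 == y) = false := by simpa using hyc ∘ Eq.symm
        simp [this]
    · -- new class: appended at the end
      have hcon : d.contains c = false := by
        rw [← Bool.not_eq_true, PySem.Dict.contains_iff_mem_keys, hkeys, List.mem_reverse,
          mem_ordOf]
        simpa using hc
      have hgetD : d.getD c [] = [] := PySem.Dict.getD_of_not_contains d [] hcon
      rw [PySem.Dict.items_insert_of_not_contains d _ hcon, ih]
      have hordc : ordOf (((c, a) :: L).map (·.1)) = c :: ordOf (L.map (·.1)) := by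
        simp only [List.map_cons, ordOf_cons, hc, if_false]
        rfl
      rw [hordc, List.reverse_cons, List.map_append]
      congr 1
      · apply List.map_congr_left
        intro y hy
        have hyc : y ≠ c := by
          rw [List.mem_reverse, mem_ordOf] at hy
          exact fun h => hc (h ▸ hy)
        congr 2
        simp only [apisOf, List.filter_cons]
        have : ((c, a).1 == y) = false := by simpa using hyc ∘ Eq.symm
        simp [this]
      · simp only [List.map_cons, List.map_nil, hgetD]
        have happ : apisOf ((c, a) :: L) c = a :: apisOf L c := by
          simp [apisOf, List.filter_cons]
        have hnil : apisOf L c = [] := by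
          simp only [apisOf, List.map_eq_nil_iff, List.filter_eq_nil_iff]
          intro p hp hbeq
          have h1 : p.1 = c := by simpa using hbeq
          exact hc (h1 ▸ List.mem_map_of_mem (f := (·.1)) hp)
        rw [happ, hnil]
        have h2 := condTrim_trim ip m a []
        rw [trimF_nil] at h2
        simp [h2]

lemma foldB_eq (L : List (String × String)) :
    ∀ (d : PySem.Dict String (List String)) (o : List String), d.keys.Nodup → o.Nodup →
      (∀ c, d.contains c = true ↔ c ∈ o) →
      L.foldl stepB (d, ordDict o) =
        (L.foldl (fun d x => d.modify x.1 [] (· ++ [x.2])) d,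
         ordDict ((L.map (·.1)).foldl ordStep o)) := by
  induction L with
  | nil => intro d o _ _ _; rfl
  | cons x L ih =>
    intro d o hd ho hco
    have hstep : stepB (d, ordDict o) x =
        (d.modify x.1 [] (· ++ [x.2]), ordDict (ordStep o x.1)) := by
      by_cases hc : d.contains x.1 = true
      · have hmem : x.1 ∈ o := (hco x.1).mp hc
        have h2 := ordDict_step o ho x.1
        rw [if_pos hmem] at h2
        simp only [stepB, hc, if_true, h2]
      · have hmem : x.1 ∉ o := fun h => hc ((hco x.1).mpr h)
        have h2 := ordDict_step o ho x.1
        rw [if_neg hmem] at h2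
        simp only [stepB, hc, Bool.false_eq_true, if_false, h2]
        simp only [PySem.Dict.modify, PySem.Dict.getD_insert_self,
          PySem.Dict.insert_insert_self,
          PySem.Dict.getD_of_not_contains _ _ (by simpa using hc)]
    rw [List.foldl_cons, hstep, ih]
    · rfl
    · rw [PySem.Dict.modify]
      by_cases hc : d.contains x.1 = true
      · rwa [PySem.Dict.keys_insert_of_contains _ _ hc]
      · rw [PySem.Dict.keys_insert_of_not_contains _ _ (by simpa using hc)]
        refine List.Nodup.append hd (List.nodup_singleton x.1) ?_
        simp only [List.disjoint_singleton]
        simp only [PySem.Dict.contains_iff_mem_keys, Bool.not_eq_true] at hc ⊢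
        exact fun h => by simp [h] at hc
    · simp only [ordStep]
      exact List.Nodup.append (ho.erase x.1) (List.nodup_singleton x.1)
        (by simp [List.disjoint_singleton]; exact ho.not_mem_erase)
    · intro c
      rw [PySem.Dict.modify, PySem.Dict.contains_insert]
      simp only [ordStep, List.mem_append, List.mem_singleton]
      by_cases hcx : c = x.1
      · simp [hcx]
      · simp [hcx, hco c, (ho.mem_erase_iff ..), beq_iff_eq]

lemma final_fold (items : List (String × List String)) :
    ∀ (acc : List String × List (List String)),
      items.foldl (fun acc kv => (PySem.List.insert acc.1 0 kv.1, PySem.List.insert acc.2 0 kv.2)) acc =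
        ((items.map (·.1)).reverse ++ acc.1, (items.map (·.2)).reverse ++ acc.2) := by
  induction items with
  | nil => simp
  | cons kv items ih =>
    intro acc
    rw [List.foldl_cons, ih]
    simp [PySem.List.insert_zero]

-- ===== VERDICT (by name: the statement is the Claim_ definition above) =====
theorem deal_with_sub_str_spec : Claim_equal_deal_with_sub_str := by
  intro sub_seq is_pre max_api_len _ hpre
  unfold Spec_deal_with_sub_str
  obtain ⟨m, rfl⟩ : ∃ m : Nat, max_api_len = (m : Int) :=
    ⟨max_api_len.toNat, (Int.toNat_of_nonneg hpre).symm⟩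
  unfold deal_with_sub_str deal_with_sub_str_alt
  have hmod : PySem.Int.mod (PySem.List.len sub_seq) 2 = ((sub_seq.length % 2 : Nat) : Int) := by
    rw [PySem.List.len_eq]
    exact_mod_cast PySem.Int.mod_natCast sub_seq.length 2
  set L := pairsOf sub_seq with hL
  set M := L.map (·.1) with hM
  -- A's loop is the reverse fold of stepA over the forward pairs
  have hA : (PySem.List.pyRange (PySem.List.len sub_seq - 1) 0 (-2)).foldl
      (fun d i =>
        let class_name := PySem.List.pyGetD sub_seq (i - 1) ""
        let api_name := class_name ++ "." ++ PySem.List.pyGetD sub_seq i ""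
        let d := if !(d.contains class_name) then d.insert class_name [] else d
        let d := d.insert class_name (PySem.List.insert (d.getD class_name []) 0 api_name)
        if PySem.List.len (d.getD class_name []) > (m : Int) then
          let seq := d.getD class_name []
          if is_pre then d.insert class_name (PySem.List.slice seq (some (-(m : Int))) none)
          else d.insert class_name (PySem.List.slice seq none (some (m : Int)))
        else d)
      PySem.Dict.empty
      = L.reverse.foldl (stepA is_pre (m : Int)) PySem.Dict.empty := by
    rw [PySem.List.len_eq, range_rev sub_seq.length, ← List.map_reverse, List.foldl_map,
      hL, pairsOf, ← List.map_reverse, List.foldl_map]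
    congr 1
    funext d p
    simp only [stepA, add_sub_cancel_right]
  -- B's loop is the forward fold of stepB over the forward pairs
  have hB : (PySem.List.pyRange (PySem.Int.mod (PySem.List.len sub_seq) 2)
        (PySem.List.len sub_seq - 1) 2).foldl
      (fun st p =>
        let c := PySem.List.pyGetD sub_seq p ""
        let fo := if st.1.contains c then (st.1, st.2.erase c)
                  else (st.1.insert c [], st.2)
        (fo.1.modify c [] (· ++ [c ++ "." ++ PySem.List.pyGetD sub_seq (p + 1) ""]),
         fo.2.insert c true))
      (PySem.Dict.empty, PySem.Dict.empty)
      = L.foldl stepB (PySem.Dict.empty, PySem.Dict.empty) := by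
    rw [hmod, PySem.List.len_eq, hL, pairsOf, List.foldl_map]
    rfl
  rw [hA, hB]
  rw [show (PySem.Dict.empty : PySem.Dict String Bool) = ordDict [] from rfl]
  rw [foldB_eq L PySem.Dict.empty []
    (by rw [PySem.Dict.keys_empty]; exact List.nodup_nil) List.nodup_nil
    (by intro c; simp [PySem.Dict.contains_empty])]
  rw [final_fold, foldA_char]
  simp only [List.map_map, List.append_nil]
  have hfst : ((ordOf M).reverse.map
      ((fun kv => kv.1) ∘ fun c => (c, trimF is_pre (m : Int) (apisOf L c)))) = (ordOf M).reverse := by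
    simp [Function.comp_def]
  have hsnd : ((ordOf M).reverse.map
      ((fun kv => kv.2) ∘ fun c => (c, trimF is_pre (m : Int) (apisOf L c)))) =
      (ordOf M).reverse.map (fun c => trimF is_pre (m : Int) (apisOf L c)) := by
    simp [Function.comp_def]
  have hkeysB : ∀ o : List String, (ordDict o).keys = o := by
    intro o
    rw [ordDict, PySem.Dict.keys_mk]
    simp [Function.comp_def]
  rw [hfst, hsnd, List.reverse_reverse, ← List.map_reverse, List.reverse_reverse, hkeysB]
  show (ordOf M, _) = (ordOf M, _)
  congr 1
  apply List.map_congr_left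
  intro c hc
  rw [PySem.Dict.getD_foldl_modify_append]
  show trimF is_pre (m : Int) _ = _
  simp only [PySem.Dict.getD_empty, List.nil_append]
  rfl
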